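-- pv_equiv track=rewrite | github.com/fluiddyn/fluiddyn | fluiddyn/util/matlab2py/cleanmat.py | modif_spaces_around_operators
-- ===== SOURCE A (Python) =====
-- def is_comment_line(line):
--     return line.strip().startswith("%")
--
-- def modif_spaces_around_operators(code_lines):
--     lines_new = []
--     for line in code_lines:
--
--         if is_comment_line(line) or "=" not in line or "for " in line:
--             lines_new.append(line)
--             continue
--
--         parts = line.split("=")
--
--         new_line = ""
--
--         for i, part in enumerate(parts[:-1]):
--             new_line += part
--
--             if part != "" and not part.endswith(" "):
--                 new_line += " "
--
--             new_line += "="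
--
--             if parts[i + 1] != "" and not parts[i + 1].startswith(" "):
--                 new_line += " "
--
--         new_line += parts[-1]
--         lines_new.append(new_line)
--
--     return lines_new
-- ===== SOURCE B (Python) =====
-- def is_comment_line(line):
--     return line.strip().startswith("%")
--
--
-- def _fix_line(line):
--     # single left-to-right character scan instead of split/rebuild
--     if is_comment_line(line) or "=" not in line or "for " in line:
--         return line
--     out = []
--     prev = None
--     n = len(line)
--     for i, ch in enumerate(line):
--         if ch == "=":
--             if prev is not None and prev != "=" and prev != " ":
--                 out.append(" ")
--             out.append("=")
--             if i + 1 < n and line[i + 1] != "=" and line[i + 1] != " ":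
--                 out.append(" ")
--         else:
--             out.append(ch)
--         prev = ch
--     return "".join(out)
--
--
-- def modif_spaces_around_operators(code_lines):
--     return [_fix_line(line) for line in code_lines]
-- ===== Notes on version B (the rewrite author's own statement) =====
-- stated objective: alternative
-- what changed: Replaces the split('=')/enumerate rebuild of each line by a single left-to-right character scan that inserts a space around each '=' based on the neighbouring characters, and the append-loop over lines by a per-line helper mapped with a comprehension.
import Mathlib
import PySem

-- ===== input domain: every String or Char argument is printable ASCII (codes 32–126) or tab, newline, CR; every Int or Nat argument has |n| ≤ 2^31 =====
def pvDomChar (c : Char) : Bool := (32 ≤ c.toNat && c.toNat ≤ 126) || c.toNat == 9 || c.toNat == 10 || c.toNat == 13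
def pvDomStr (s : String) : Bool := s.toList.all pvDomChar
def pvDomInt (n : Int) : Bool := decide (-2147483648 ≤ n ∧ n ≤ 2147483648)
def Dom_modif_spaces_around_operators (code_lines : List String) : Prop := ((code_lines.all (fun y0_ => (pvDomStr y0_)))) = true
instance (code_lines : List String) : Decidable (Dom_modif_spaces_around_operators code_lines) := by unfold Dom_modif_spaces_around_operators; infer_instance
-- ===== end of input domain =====

-- B replaces A's split('=')/rebuild of each line by a single character scan; equivalence of return values is proved (no mutation involved).

-- ===== PORT A =====
-- is_comment_line(line)
def pvIsCommentLine (line : String) : Bool :=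
  PySem.Chars.startswith (PySem.Chars.strip line.toList) ['%']

-- the inner 'for i, part in enumerate(parts[:-1])' rebuild; structured as recursion on
-- the parts list (each step sees parts[i] and parts[i+1]; the final singleton is parts[-1])
def pvRebuildA : List (List Char) → List Char
  | [] => []
  | [last] => last
  | part :: next :: rest =>
    part
      ++ (if part ≠ [] ∧ PySem.Chars.endswith part [' '] = false then [' '] else [])
      ++ ['=']
      ++ (if next ≠ [] ∧ PySem.Chars.startswith next [' '] = false then [' '] else [])
      ++ pvRebuildA (next :: rest)

def pvProcessA (line : String) : String :=
  if pvIsCommentLine line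
      ∨ PySem.Chars.isIn ['='] line.toList = false
      ∨ PySem.Chars.isIn "for ".toList line.toList then
    line
  else
    String.ofList (pvRebuildA (PySem.Chars.splitOn line.toList ['=']))

def modif_spaces_around_operators (code_lines : List String) : List String :=
  code_lines.foldl (fun lines_new line => lines_new ++ [pvProcessA line]) []

-- ===== PORT B =====
def pvSpaceBefore (prev : Option Char) : List Char :=
  match prev with
  | some p => if p = '=' ∨ p = ' ' then [] else [' ']
  | none => []

def pvSpaceAfter (rest : List Char) : List Char :=
  match rest with
  | d :: _ => if d = '=' ∨ d = ' ' then [] else [' ']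
  | [] => []

-- the character scan: prev is the previously seen character (None at the start)
def pvScanB (prev : Option Char) : List Char → List Char
  | [] => []
  | c :: rest =>
    if c = '=' then
      pvSpaceBefore prev ++ '=' :: (pvSpaceAfter rest ++ pvScanB (some c) rest)
    else
      c :: pvScanB (some c) rest

def pvFixLineB (line : String) : String :=
  if pvIsCommentLine line
      ∨ PySem.Chars.isIn ['='] line.toList = false
      ∨ PySem.Chars.isIn "for ".toList line.toList then
    line
  else
    String.ofList (pvScanB none line.toList)

def modif_spaces_around_operators_alt (code_lines : List String) : List String :=
  code_lines.map pvFixLineB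

-- ===== PRECONDITION & SPEC =====
def Spec_modif_spaces_around_operators (code_lines : List String) (out : List String) : Prop := out = modif_spaces_around_operators_alt code_lines
instance (code_lines : List String) (out : List String) : Decidable (Spec_modif_spaces_around_operators code_lines out) := by unfold Spec_modif_spaces_around_operators; infer_instance

-- ===== CLAIM (what is proved, stated in full; the proofs are below) =====
def Claim_equal_modif_spaces_around_operators : Prop := ∀ (code_lines : List String), Dom_modif_spaces_around_operators code_lines → Spec_modif_spaces_around_operators code_lines (modif_spaces_around_operators code_lines)

-- ===== LEMMAS AND PROOFS =====

-- structural recurrence of split('=') on the character list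
def pvSplit1 : List Char → List (List Char)
  | [] => [[]]
  | c :: rest =>
    if c = '=' then [] :: pvSplit1 rest
    else (pvSplit1 rest).modifyHead (c :: ·)

theorem pvSplit1_ne_nil (cs : List Char) : pvSplit1 cs ≠ [] := by
  cases cs with
  | nil => simp [pvSplit1]
  | cons c rest =>
    simp only [pvSplit1]
    split_ifs
    · simp
    · cases h : pvSplit1 rest with
      | nil => exact absurd h (pvSplit1_ne_nil rest)
      | cons a t => simp

theorem pvModifyHead_modifyHead {α : Type} (f g : α → α) (l : List α) :
    (l.modifyHead g).modifyHead f = l.modifyHead (fun x => f (g x)) := by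
  cases l <;> simp

theorem pvGo_eq (fuel : Nat) (l cur : List Char) (acc : List (List Char)) (h : l.length < fuel) :
    PySem.Chars.splitOn.go ['='] fuel l cur acc
      = acc.reverse ++ (pvSplit1 l).modifyHead (cur.reverse ++ ·) := by
  induction fuel generalizing l cur acc with
  | zero => omega
  | succ n ih =>
    cases l with
    | nil => simp [PySem.Chars.splitOn.go, pvSplit1]
    | cons c rest =>
      by_cases hc : c = '='
      · subst hc
        rw [show PySem.Chars.splitOn.go ['='] (n+1) ('=' :: rest) cur acc
              = PySem.Chars.splitOn.go ['='] n rest [] (cur.reverse :: acc) by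
            simp [PySem.Chars.splitOn.go, List.isPrefixOf]]
        rw [ih rest [] (cur.reverse :: acc) (by simpa using Nat.lt_of_succ_lt_succ h)]
        cases hs : pvSplit1 rest with
        | nil => exact absurd hs (pvSplit1_ne_nil rest)
        | cons a t => simp [pvSplit1, hs]
      · rw [show PySem.Chars.splitOn.go ['='] (n+1) (c :: rest) cur acc
              = PySem.Chars.splitOn.go ['='] n rest (c :: cur) acc by
            simp [PySem.Chars.splitOn.go]
            exact fun hp => absurd hp.symm hc]
        rw [ih rest (c :: cur) acc (by simpa using Nat.lt_of_succ_lt_succ h)]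
        simp only [pvSplit1, if_neg hc, pvModifyHead_modifyHead]
        congr 2
        funext x
        simp

theorem pvSplitOn_eq (cs : List Char) :
    PySem.Chars.splitOn cs ['='] = pvSplit1 cs := by
  rw [PySem.Chars.splitOn, pvGo_eq (cs.length + 1) cs [] [] (by omega)]
  cases hs : pvSplit1 cs with
  | nil => exact absurd hs (pvSplit1_ne_nil cs)
  | cons a t => simp

theorem pvEndswith_space (l : List Char) :
    PySem.Chars.endswith l [' '] = (l.getLast? == some ' ') := by
  rw [PySem.Chars.endswith, List.isSuffixOf, List.getLast?_eq_head?_reverse]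
  cases l.reverse with
  | nil => simp [List.isPrefixOf]
  | cons a t => simp [List.isPrefixOf, eq_comm]

theorem pvStartswith_space (l : List Char) :
    PySem.Chars.startswith l [' '] = (l.head? == some ' ') := by
  rw [PySem.Chars.startswith]
  cases l with
  | nil => simp [List.isPrefixOf]
  | cons a t => simp [List.isPrefixOf, eq_comm]

-- the 'space after =' decision of A on the next split part equals B's look at the next char
theorem pvSpaceAfter_head (r : List Char) (a : List Char) (t : List (List Char))
    (hs : pvSplit1 r = a :: t) :
    (if a ≠ [] ∧ PySem.Chars.startswith a [' '] = false then [' '] else ([] : List Char))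
      = pvSpaceAfter r := by
  cases r with
  | nil =>
    simp [pvSplit1] at hs
    simp [hs.1, pvSpaceAfter]
  | cons d r' =>
    by_cases hd : d = '='
    · subst hd
      simp [pvSplit1] at hs
      simp [hs.1, pvSpaceAfter]
    · cases hb : pvSplit1 r' with
      | nil => exact absurd hb (pvSplit1_ne_nil r')
      | cons b u =>
        simp only [pvSplit1, if_neg hd, hb, List.modifyHead] at hs
        obtain ⟨ha, -⟩ := List.cons.inj hs
        subst ha
        simp only [pvSpaceAfter, pvStartswith_space]
        by_cases hsp : d = ' ' <;> simp [hsp, hd]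

-- main invariant: rebuilding A's split with a pending prefix part equals that prefix ++ B's scan
theorem pvMain (cs : List Char) (cur : List Char) (prev : Option Char)
    (hc : (cur = [] → prev = none ∨ prev = some '=')
        ∧ (∀ h : cur ≠ [], prev = some (cur.getLast h) ∧ cur.getLast h ≠ '=')) :
    pvRebuildA ((pvSplit1 cs).modifyHead (cur ++ ·)) = cur ++ pvScanB prev cs := by
  induction cs generalizing cur prev with
  | nil => simp [pvSplit1, pvRebuildA, pvScanB]
  | cons c rest ih =>
    by_cases hcq : c = '='
    · subst hcq
      cases hs : pvSplit1 rest with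
      | nil => exact absurd hs (pvSplit1_ne_nil rest)
      | cons a t =>
        have hrec := ih [] (some '=') (by simp)
        rw [hs] at hrec
        simp at hrec
        have hAfter := pvSpaceAfter_head rest a t hs
        have hsplit : List.modifyHead (fun x => cur ++ x) (pvSplit1 ('=' :: rest))
            = cur :: a :: t := by
          simp [pvSplit1, hs]
        rw [hsplit]
        simp only [pvRebuildA]
        rw [hrec]
        simp only [hAfter]
        have hBefore : (if cur ≠ [] ∧ PySem.Chars.endswith cur [' '] = false then [' ']
            else ([] : List Char)) = pvSpaceBefore prev := by
          by_cases hne : cur = []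
          · subst hne
            rcases hc.1 rfl with h | h <;> simp [h, pvSpaceBefore]
          · obtain ⟨hp, hlast⟩ := hc.2 hne
            rw [pvEndswith_space, List.getLast?_eq_some_getLast hne, hp]
            by_cases hsp : cur.getLast hne = ' ' <;>
              simp [pvSpaceBefore, hsp, hne, hlast]
        simp only [hBefore]
        simp [pvScanB]
    · have hrec := ih (cur ++ [c]) (some c)
        (by
          constructor
          · intro h; simp at h
          · intro h
            simp [hcq])
      simp only [pvSplit1, if_neg hcq, pvModifyHead_modifyHead] at *
      have : (fun x => cur ++ c :: x) = (fun x => (cur ++ [c]) ++ x) := by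
        funext x; simp
      rw [this, hrec]
      simp [pvScanB, hcq]

theorem pvProcess_eq (line : String) : pvProcessA line = pvFixLineB line := by
  rw [pvProcessA, pvFixLineB]
  split_ifs with h
  · rfl
  · have := pvMain line.toList [] none (by simp)
    simp only [List.nil_append] at this
    rw [pvSplitOn_eq]
    cases hs : pvSplit1 line.toList with
    | nil => exact absurd hs (pvSplit1_ne_nil line.toList)
    | cons a t =>
      rw [hs] at this
      simp only [List.modifyHead] at this
      rw [this]

theorem pvFoldl_append_map (xs : List String) (acc : List String) :
    xs.foldl (fun lines_new line => lines_new ++ [pvProcessA line]) acc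
      = acc ++ xs.map pvFixLineB := by
  induction xs generalizing acc with
  | nil => simp
  | cons x t ih =>
    simp only [List.foldl_cons, List.map_cons]
    rw [ih (acc ++ [pvProcessA x]), pvProcess_eq]
    simp

-- ===== VERDICT (by name: the statement is the Claim_ definition above) =====
theorem modif_spaces_around_operators_spec : Claim_equal_modif_spaces_around_operators := by
  intro code_lines _
  unfold Spec_modif_spaces_around_operators modif_spaces_around_operators
    modif_spaces_around_operators_alt
  simpa using pvFoldl_append_map code_lines []
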